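-- pv_equiv track=rewrite | github.com/tomo-playground/sdd-orchestrator | backend/services/prompt/multi_character.py | _ensure_interaction_tag
-- ===== SOURCE A (Python) =====
-- _INTERACTION_TAGS = frozenset(
--     {
--         "eye_contact",
--         "facing_another",
--         "holding_hands",
--         "hugging",
--         "carrying",
--         "arm_in_arm",
--     }
-- )
--
-- def _ensure_interaction_tag(scene_flat: str, scene_tags: list[str]) -> str:
--     """Interaction 태그가 하나도 없으면 facing_another 기본 삽입."""
--     all_tags = set()
--     for t in scene_tags:
--         all_tags.add(t.lower().replace(" ", "_").strip())
--     if scene_flat: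
--         for t in scene_flat.split(","):
--             all_tags.add(t.strip().lower().replace(" ", "_"))
--
--     if all_tags & _INTERACTION_TAGS:
--         return scene_flat
--
--     # 기본 interaction 태그 삽입
--     if scene_flat:
--         return f"facing_another, {scene_flat}"
--     return "facing_another"
-- ===== SOURCE B (Python) =====
-- _TAG_TUPLE = (
--     "eye_contact",
--     "facing_another",
--     "holding_hands",
--     "hugging",
--     "carrying",
--     "arm_in_arm",
-- )
--
--
-- def _ensure_interaction_tag(scene_flat: str, scene_tags: list[str]) -> str:
--     """Interaction 태그가 하나도 없으면 facing_another 기본 삽입 (no set; nested equality scans)."""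
--     pieces = scene_flat.split(",") if scene_flat else []
--     for tag in _TAG_TUPLE:
--         for t in scene_tags:
--             if t.lower().replace(" ", "_").strip() == tag:
--                 return scene_flat
--         for p in pieces:
--             if p.strip().lower().replace(" ", "_") == tag:
--                 return scene_flat
--     if scene_flat:
--         return "facing_another, " + scene_flat
--     return "facing_another"
-- ===== Notes on version B (the rewrite author's own statement) =====
-- stated objective: alternative
-- what changed: Replaces A's accumulated all_tags set and frozenset intersection with nested linear scans: the outer loop runs over the six fixed interaction tags and the inner loops test each token's normalized form by direct string equality, returning as soon as one matches; no set or membership structure is built.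
import Mathlib
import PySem

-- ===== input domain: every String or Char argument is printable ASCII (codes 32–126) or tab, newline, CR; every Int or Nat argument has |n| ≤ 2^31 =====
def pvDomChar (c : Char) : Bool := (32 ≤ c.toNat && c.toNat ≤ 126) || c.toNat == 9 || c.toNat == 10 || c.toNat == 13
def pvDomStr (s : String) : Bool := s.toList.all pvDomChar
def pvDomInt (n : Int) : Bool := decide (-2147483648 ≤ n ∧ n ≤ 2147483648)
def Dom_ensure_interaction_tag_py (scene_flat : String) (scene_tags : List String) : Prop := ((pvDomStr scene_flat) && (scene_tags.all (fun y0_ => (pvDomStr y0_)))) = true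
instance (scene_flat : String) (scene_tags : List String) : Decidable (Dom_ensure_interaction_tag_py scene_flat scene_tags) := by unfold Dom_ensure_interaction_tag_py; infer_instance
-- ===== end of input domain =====

-- B replaces A's accumulated set and frozenset intersection by nested equality scans over the six fixed tags (alternative decomposition, no auxiliary structure).

def tagTuple : List String :=
  ["eye_contact", "facing_another", "holding_hands", "hugging", "carrying", "arm_in_arm"]

def interactionTags : PySem.Set String := PySem.Set.ofList tagTuple

-- ===== PORT A =====
def ensure_interaction_tag_py (scene_flat : String) (scene_tags : List String) : String :=
  let all_tags0 : PySem.Set String :=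
    scene_tags.foldl
      (fun s t => PySem.Set.add s (PySem.Str.strip (PySem.Str.replace (PySem.Str.lower t) " " "_")))
      PySem.Set.empty
  let all_tags : PySem.Set String :=
    if scene_flat ≠ "" then
      ((PySem.Str.split? scene_flat ",").getD []).foldl  -- sep "," ≠ "": split? is always some
        (fun s t => PySem.Set.add s (PySem.Str.replace (PySem.Str.lower (PySem.Str.strip t)) " " "_"))
        all_tags0
    else all_tags0
  if PySem.Set.inter all_tags interactionTags ≠ [] then scene_flat
  else if scene_flat ≠ "" then "facing_another, " ++ scene_flat
  else "facing_another"

-- ===== PORT B =====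
def ensure_interaction_tag_py_alt (scene_flat : String) (scene_tags : List String) : String :=
  let pieces : List String :=
    if scene_flat ≠ "" then (PySem.Str.split? scene_flat ",").getD [] else []
  if tagTuple.any (fun tag =>
      scene_tags.any (fun t =>
        PySem.Str.strip (PySem.Str.replace (PySem.Str.lower t) " " "_") == tag)
      || pieces.any (fun p =>
        PySem.Str.replace (PySem.Str.lower (PySem.Str.strip p)) " " "_" == tag))
  then scene_flat
  else if scene_flat ≠ "" then "facing_another, " ++ scene_flat
  else "facing_another"

-- ===== PRECONDITION & SPEC =====
def Spec_ensure_interaction_tag_py (scene_flat : String) (scene_tags : List String) (out : String) : Prop := out = ensure_interaction_tag_py_alt scene_flat scene_tags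
instance (scene_flat : String) (scene_tags : List String) (out : String) : Decidable (Spec_ensure_interaction_tag_py scene_flat scene_tags out) := by unfold Spec_ensure_interaction_tag_py; infer_instance

-- ===== CLAIM (what is proved, stated in full; the proofs are below) =====
def Claim_equal_ensure_interaction_tag_py : Prop := ∀ (scene_flat : String) (scene_tags : List String), Dom_ensure_interaction_tag_py scene_flat scene_tags → Spec_ensure_interaction_tag_py scene_flat scene_tags (ensure_interaction_tag_py scene_flat scene_tags)

-- ===== LEMMAS AND PROOFS =====

-- the two programs test the same condition: some normalized token equals one of the six tags
theorem cond_iff (c : Prop) [Decidable c] (f g : String → String) (iT : List String)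
    (tags fl : List String) :
    (PySem.Set.inter
        (if c then
          fl.foldl (fun s t => PySem.Set.add s (g t))
            (tags.foldl (fun s t => PySem.Set.add s (f t)) PySem.Set.empty)
        else tags.foldl (fun s t => PySem.Set.add s (f t)) PySem.Set.empty)
        (PySem.Set.ofList iT) ≠ []) ↔
    (iT.any (fun tag =>
        tags.any (fun t => f t == tag)
        || (if c then fl else []).any (fun p => g p == tag)) = true) := by
  rw [Ne, List.eq_nil_iff_forall_not_mem]
  push Not
  simp only [List.any_eq_true, beq_iff_eq, Bool.or_eq_true,
    PySem.Set.mem_inter, PySem.Set.mem_ofList]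
  by_cases h : c <;>
    simp [h, PySem.Set.mem_foldl_add] <;> aesop

theorem ensure_interaction_tag_py_eq (scene_flat : String) (scene_tags : List String) :
    ensure_interaction_tag_py scene_flat scene_tags
      = ensure_interaction_tag_py_alt scene_flat scene_tags := by
  unfold ensure_interaction_tag_py ensure_interaction_tag_py_alt interactionTags
  have h := cond_iff (scene_flat ≠ "")
    (fun t => PySem.Str.strip (PySem.Str.replace (PySem.Str.lower t) " " "_"))
    (fun t => PySem.Str.replace (PySem.Str.lower (PySem.Str.strip t)) " " "_")
    tagTuple scene_tags ((PySem.Str.split? scene_flat ",").getD [])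
  by_cases hc : (PySem.Set.inter
      (if scene_flat ≠ "" then
        ((PySem.Str.split? scene_flat ",").getD []).foldl
          (fun s t => PySem.Set.add s (PySem.Str.replace (PySem.Str.lower (PySem.Str.strip t)) " " "_"))
          (scene_tags.foldl
            (fun s t => PySem.Set.add s (PySem.Str.strip (PySem.Str.replace (PySem.Str.lower t) " " "_")))
            PySem.Set.empty)
      else
        scene_tags.foldl
          (fun s t => PySem.Set.add s (PySem.Str.strip (PySem.Str.replace (PySem.Str.lower t) " " "_")))
          PySem.Set.empty)
      (PySem.Set.ofList tagTuple) ≠ [])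
  · rw [if_pos hc, if_pos (h.mp hc)]
  · rw [if_neg hc, if_neg (fun hb => hc (h.mpr hb))]

-- ===== VERDICT (by name: the statement is the Claim_ definition above) =====
theorem ensure_interaction_tag_py_spec : Claim_equal_ensure_interaction_tag_py := by
  intro scene_flat scene_tags _
  exact (ensure_interaction_tag_py_eq scene_flat scene_tags)
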